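-- pv_equiv track=rewrite | github.com/protoss70/Coding-Interview-Questions | Coding Interview Questions/Facebook's price finder/daily problem 47.py | BestPrice1
-- ===== SOURCE A (Python) =====
-- def BestPrice1(a):
--
--     LowestPrices = sorted(a)
--
--     profits = []
--     for i in LowestPrices:
--         index = 0
--         liste = []
--
--         for b in range(0, len(a)):
--             if i == a[b]:
--                 index = b
--         for b in range(index, len(a)):
--             liste.append(a[b])
--         try:
--             profits.append(sorted(liste, reverse=True)[0] - i)
--         except:
--             pass
--     for i in sorted(profits, reverse=True):
--
--         for b in range(0, len(profits)):
--             if i == profits[b]: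
--                 return LowestPrices[b]
-- ===== SOURCE B (Python) =====
-- def BestPrice1(a):
--     # One backward pass computes suffix maxima; profit of a value is taken at
--     # its last occurrence; answer is the smallest value achieving the maximal profit.
--     if not a:
--         return None
--     last = {}
--     for j in range(len(a)):
--         last[a[j]] = j
--     suf = []
--     m = a[-1]
--     for v in reversed(a):
--         if v > m:
--             m = v
--         suf.append(m)
--     suf.reverse()
--     best = None
--     for v, j in last.items():
--         p = suf[j] - v
--         if best is None or p > best[0] or (p == best[0] and v < best[1]):
--             best = (p, v)
--     return best[1]
-- ===== Notes on version B (the rewrite author's own statement) =====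
-- stated objective: faster
-- what changed: A re-scans the whole list and re-sorts a suffix for every element of the sorted list, then re-sorts the profit list to pick the answer; B makes one backward pass computing suffix maxima plus a last-occurrence dictionary, and selects the smallest value with maximal profit in a single scan over the distinct values.
import Mathlib
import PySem

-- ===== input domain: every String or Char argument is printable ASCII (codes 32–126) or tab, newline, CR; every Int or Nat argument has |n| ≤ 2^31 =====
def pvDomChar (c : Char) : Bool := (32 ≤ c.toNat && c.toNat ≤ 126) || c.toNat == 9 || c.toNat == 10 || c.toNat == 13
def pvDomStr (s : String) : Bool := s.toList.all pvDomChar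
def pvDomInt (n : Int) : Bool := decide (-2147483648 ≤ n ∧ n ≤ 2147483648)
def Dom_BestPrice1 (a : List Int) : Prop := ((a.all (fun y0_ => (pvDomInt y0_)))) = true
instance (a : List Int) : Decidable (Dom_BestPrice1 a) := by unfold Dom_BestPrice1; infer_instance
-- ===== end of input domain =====

-- B replaces A's per-value quadratic rescans and re-sorts by one backward suffix-maximum
-- pass plus a last-occurrence dictionary (objective: faster).

-- ===== PORT A =====
def BestPrice1 (a : List Int) : Option Int :=
  let lowest := PySem.List.sorted a (fun x => x) false
  let profits : List Int := lowest.foldl (fun profits i =>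
    let index : Int := (PySem.List.pyRange 0 a.length 1).foldl
      (fun index b => if i == PySem.List.pyGetD a b 0 then b else index) 0
    let liste : List Int := (PySem.List.pyRange index a.length 1).foldl
      (fun l b => l ++ [PySem.List.pyGetD a b 0]) []
    match PySem.List.pyGet? (PySem.List.sorted liste (fun x => x) true) 0 with
    | some m => profits ++ [m - i]
    | none => profits) []
  (PySem.List.sorted profits (fun x => x) true).findSome? (fun i =>
    (PySem.List.pyRange 0 profits.length 1).findSome? (fun b =>
      if i == PySem.List.pyGetD profits b 0 then PySem.List.pyGet? lowest b else none))

-- ===== PORT B =====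
def BestPrice1_alt (a : List Int) : Option Int :=
  match a with
  | [] => none
  | _ :: _ =>
    let last : PySem.Dict Int Int := (PySem.List.pyRange 0 a.length 1).foldl
      (fun d j => d.insert (PySem.List.pyGetD a j 0) j) PySem.Dict.empty
    let st := a.reverse.foldl
      (fun (st : Int × List Int) v =>
        let m := if v > st.1 then v else st.1
        (m, st.2 ++ [m]))
      (PySem.List.pyGetD a (-1) 0, [])
    let suf := st.2.reverse
    let best := last.items.foldl
      (fun (best : Option (Int × Int)) vj =>
        let p := PySem.List.pyGetD suf vj.2 0 - vj.1
        match best with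
        | none => some (p, vj.1)
        | some b => if p > b.1 ∨ (p = b.1 ∧ vj.1 < b.2) then some (p, vj.1) else best)
      none
    match best with
    | some b => some b.2
    | none => none

-- ===== PRECONDITION & SPEC =====
def Spec_BestPrice1 (a : List Int) (out : Option Int) : Prop := out = BestPrice1_alt a
instance (a : List Int) (out : Option Int) : Decidable (Spec_BestPrice1 a out) := by unfold Spec_BestPrice1; infer_instance

-- ===== CLAIM (what is proved, stated in full; the proofs are below) =====
def Claim_equal_BestPrice1 : Prop := ∀ (a : List Int), Dom_BestPrice1 a → Spec_BestPrice1 a (BestPrice1 a)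

-- ===== LEMMAS AND PROOFS =====

-- last index of v among positions < n (as the Python loops see it, via getD)
def lastIdxU (a : List Int) (v : Int) : Nat → Option Int
  | 0 => none
  | n+1 => if a[n]?.getD 0 = v then some (n : Int) else lastIdxU a v n

-- canonical last-occurrence index, suffix maximum and profit of a value
def Jn (a : List Int) (v : Int) : Nat := ((lastIdxU a v a.length).getD 0).toNat
def Mv (a : List Int) (v : Int) : Int := (a.drop (Jn a v)).foldl max (a[Jn a v]?.getD 0)
def Pv (a : List Int) (v : Int) : Int := Mv a v - v

def IsMaxOf (l : List Int) (x : Int) : Prop := x ∈ l ∧ ∀ z ∈ l, z ≤ x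

def Beats (c x : Int × Int) : Prop := x.1 < c.1 ∨ (x.1 = c.1 ∧ c.2 ≤ x.2)

def scanMax (m0 : Int) : List Int → List Int
  | [] => []
  | v :: l => (if v > m0 then v else m0) :: scanMax (if v > m0 then v else m0) l

lemma IsMax_unique {l : List Int} {x y : Int} (hx : IsMaxOf l x) (hy : IsMaxOf l y) : x = y :=
  le_antisymm (hy.2 x hx.1) (hx.2 y hy.1)

lemma lastIdxU_spec (a : List Int) (v : Int) :
    ∀ n j, lastIdxU a v n = some j →
      0 ≤ j ∧ j.toNat < n ∧ a[j.toNat]?.getD 0 = v ∧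
        ∀ k, j.toNat < k → k < n → a[k]?.getD 0 ≠ v := by
  intro n
  induction n with
  | zero => intro j h; simp [lastIdxU] at h
  | succ n ih =>
    intro j h
    unfold lastIdxU at h
    split at h
    · rename_i hv
      cases h
      refine ⟨Int.natCast_nonneg n, by simp, by simpa using hv, ?_⟩
      intro k hk1 hk2
      simp at hk1
      omega
    · rename_i hv
      obtain ⟨h0, hlt, hget, hlast⟩ := ih j h
      refine ⟨h0, by omega, hget, ?_⟩
      intro k hk1 hk2
      by_cases hkn : k < n
      · exact hlast k hk1 hkn
      · have : k = n := by omega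
        subst this; exact hv

lemma lastIdxU_isSome (a : List Int) (v : Int) :
    ∀ n, (∃ k < n, a[k]?.getD 0 = v) → (lastIdxU a v n).isSome := by
  intro n
  induction n with
  | zero => rintro ⟨k, hk, _⟩; omega
  | succ n ih =>
    rintro ⟨k, hk, hv⟩
    unfold lastIdxU
    split
    · rfl
    · rename_i hn
      refine ih ⟨k, ?_, hv⟩
      rcases Nat.lt_succ_iff_lt_or_eq.mp hk with h | h
      · exact h
      · subst h; exact absurd hv hn

lemma foldIdx (a : List Int) (v : Int) :
    ∀ (n : Nat) (z : Int), (PySem.List.pyRange 0 (n : Int) 1).foldl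
        (fun idx b => if v == PySem.List.pyGetD a b 0 then b else idx) z
      = (lastIdxU a v n).getD z := by
  intro n z
  induction n generalizing z with
  | zero => simp [lastIdxU, PySem.List.pyRange_one_eq_nil]
  | succ n ih =>
    rw [show ((n+1 : Nat) : Int) = (n : Int) + 1 by push_cast; ring,
        PySem.List.pyRange_one_succ_right (Int.natCast_nonneg n), List.foldl_append]
    simp only [List.foldl_cons, List.foldl_nil, ih, PySem.List.pyGetD_natCast]
    rw [show lastIdxU a v (n+1)
        = if a[n]?.getD 0 = v then some (n : Int) else lastIdxU a v n from rfl]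
    by_cases hv : a[n]?.getD 0 = v
    · simp [List.getD, hv]
    · simp [List.getD, hv, Ne.symm hv]

lemma dictGetD (a : List Int) (v : Int) :
    ∀ (n : Nat) (dflt : Int),
      (((PySem.List.pyRange 0 (n : Int) 1).foldl
          (fun d j => d.insert (PySem.List.pyGetD a j 0) j)
          (PySem.Dict.empty : PySem.Dict Int Int)).getD v dflt)
        = (lastIdxU a v n).getD dflt := by
  intro n dflt
  induction n with
  | zero => simp [lastIdxU, PySem.List.pyRange_one_eq_nil, PySem.Dict.getD_empty]
  | succ n ih =>
    rw [show ((n+1 : Nat) : Int) = (n : Int) + 1 by push_cast; ring,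
        PySem.List.pyRange_one_succ_right (Int.natCast_nonneg n), List.foldl_append]
    simp only [List.foldl_cons, List.foldl_nil, PySem.Dict.getD_insert,
      PySem.List.pyGetD_natCast]
    rw [show lastIdxU a v (n+1)
        = if a[n]?.getD 0 = v then some (n : Int) else lastIdxU a v n from rfl]
    by_cases hv : a[n]?.getD 0 = v
    · simp [List.getD, hv]
    · simp [List.getD, ih, hv, Ne.symm hv]

lemma Jn_spec (a : List Int) (v : Int) (hv : v ∈ a) :
    lastIdxU a v a.length = some (Jn a v : Int) ∧ Jn a v < a.length ∧
      a[Jn a v]?.getD 0 = v ∧ ∀ k, Jn a v < k → k < a.length → a[k]?.getD 0 ≠ v := by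
  obtain ⟨k, hk, hkv⟩ := List.mem_iff_getElem.mp hv
  have hex : ∃ k < a.length, a[k]?.getD 0 = v :=
    ⟨k, hk, by rw [List.getElem?_eq_getElem hk]; exact hkv⟩
  have hsome := lastIdxU_isSome a v a.length hex
  obtain ⟨j, hj⟩ := Option.isSome_iff_exists.mp hsome
  obtain ⟨h0, hlt, hget, hlast⟩ := lastIdxU_spec a v a.length j hj
  have hJ : Jn a v = j.toNat := by simp [Jn, hj]
  have hjt : (Jn a v : Int) = j := by rw [hJ]; exact Int.toNat_of_nonneg h0
  exact ⟨by rw [hjt]; exact hj, by omega, by rw [hJ]; exact hget,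
    by rw [hJ]; exact hlast⟩

lemma Mv_isMax (a : List Int) (v : Int) (hv : v ∈ a) : IsMaxOf (a.drop (Jn a v)) (Mv a v) := by
  obtain ⟨_, hlt, hget, _⟩ := Jn_spec a v hv
  have hi0 : a[Jn a v]?.getD 0 ∈ a.drop (Jn a v) := by
    have h0 : 0 < (a.drop (Jn a v)).length := by simp; omega
    have heq : (a.drop (Jn a v))[0] = a[Jn a v] := by
      simp [List.getElem_drop]
    rw [List.getElem?_eq_getElem hlt, Option.getD_some, ← heq]
    exact List.getElem_mem h0
  constructor
  · rcases PySem.List.foldl_max_mem (a.drop (Jn a v)) (a[Jn a v]?.getD 0) with h | h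
    · unfold Mv; rw [h]; exact hi0
    · exact h
  · exact (PySem.List.le_foldl_max (a.drop (Jn a v)) (a[Jn a v]?.getD 0)).2

lemma length_scanMax (m0 : Int) (l : List Int) : (scanMax m0 l).length = l.length := by
  induction l generalizing m0 with
  | nil => rfl
  | cons v l ih => simp [scanMax, ih]

lemma scanMax_getD (d : Int) :
    ∀ (l : List Int) (m0 : Int) (k : Nat), k < l.length →
      (scanMax m0 l).getD k d = (l.take (k+1)).foldl max m0 := by
  intro l
  induction l with
  | nil => intro m0 k hk; simp at hk
  | cons v l ih =>
    intro m0 k hk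
    have hm : (if v > m0 then v else m0) = max m0 v := by
      split <;> omega
    cases k with
    | zero => simp [scanMax, hm]
    | succ k =>
      simp only [scanMax, List.getD_cons_succ, List.take_succ_cons, List.foldl_cons]
      rw [ih _ k (by simpa using hk), hm]

lemma sufFold (l : List Int) :
    ∀ (m0 : Int) (acc : List Int),
      l.foldl (fun (st : Int × List Int) v =>
          (if v > st.1 then v else st.1, st.2 ++ [if v > st.1 then v else st.1]))
        (m0, acc)
      = (l.foldl (fun m v => if v > m then v else m) m0, acc ++ scanMax m0 l) := by
  induction l with
  | nil => intro m0 acc; simp [scanMax]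
  | cons v l ih =>
    intro m0 acc
    simp only [List.foldl_cons, scanMax, ih]
    simp

lemma suf_isMax (a : List Int) (h : a ≠ []) (j : Nat) (hj : j < a.length) :
    IsMaxOf (a.drop j) ((scanMax (a.getLast h) a.reverse).reverse.getD j 0) := by
  have hslen : (scanMax (a.getLast h) a.reverse).length = a.length := by
    rw [length_scanMax, List.length_reverse]
  have hj2 : j < (scanMax (a.getLast h) a.reverse).reverse.length := by
    simp [hslen]; omega
  have e1 : (scanMax (a.getLast h) a.reverse).reverse.getD j 0
      = (scanMax (a.getLast h) a.reverse).getD (a.length - 1 - j) 0 := by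
    rw [List.getD_eq_getElem _ 0 hj2, List.getElem_reverse,
        List.getD_eq_getElem _ 0 (by omega)]
    congr 1
    omega
  have e2 : (scanMax (a.getLast h) a.reverse).getD (a.length - 1 - j) 0
      = (a.reverse.take ((a.length - 1 - j) + 1)).foldl max (a.getLast h) :=
    scanMax_getD 0 a.reverse (a.getLast h) _ (by simp; omega)
  have e3 : a.reverse.take ((a.length - 1 - j) + 1) = (a.drop j).reverse := by
    rw [show (a.length - 1 - j) + 1 = a.length - j by omega, List.take_reverse,
        show a.length - (a.length - j) = j by omega]
  have hne : a.drop j ≠ [] := by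
    intro hcon
    have := congrArg List.length hcon
    simp at this
    omega
  have hmem0 : a.getLast h ∈ a.drop j := by
    have hm := List.getLast_mem hne
    rwa [List.getLast_drop hne] at hm
  rw [e1, e2, e3]
  constructor
  · rcases PySem.List.foldl_max_mem ((a.drop j).reverse) (a.getLast h) with hc | hc
    · rw [hc]; exact hmem0
    · exact List.mem_reverse.mp hc
  · intro z hz
    exact (PySem.List.le_foldl_max ((a.drop j).reverse) (a.getLast h)).2 z
      (List.mem_reverse.mpr hz)

lemma findSome?_map' {α β γ : Type} (g : α → β) (f : β → Option γ) :
    ∀ (l : List α), (l.map g).findSome? f = l.findSome? (fun x => f (g x)) := by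
  intro l
  rw [List.findSome?_map]
  rfl

lemma findSome?_range_index {α β : Type} :
    ∀ (xs : List α) (q : α → Option β) (f : Nat → Option β),
      (∀ k (hk : k < xs.length), f k = q xs[k]) →
      (List.range xs.length).findSome? f = xs.findSome? q := by
  intro xs
  induction xs with
  | nil => intro q f h; simp
  | cons x xs ih =>
    intro q f h
    rw [List.length_cons, List.range_succ_eq_map, List.findSome?_cons, List.findSome?_cons,
        h 0 (Nat.succ_pos _)]
    simp only [List.getElem_cons_zero]
    cases hq : q x with
    | some b => simp
    | none =>
      simp only []
      rw [findSome?_map']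
      exact ih q (fun k => f (Nat.succ k)) (fun k hk => by
        simpa using h (k+1) (Nat.succ_lt_succ hk))

lemma findSome?_first {α : Type} (q : α → Bool) :
    ∀ (xs : List α), (∃ v ∈ xs, q v = true) →
      ∃ pre w suf, xs = pre ++ w :: suf ∧ q w = true ∧ (∀ u ∈ pre, q u = false) ∧
        xs.findSome? (fun v => if q v then some v else none) = some w := by
  intro xs
  induction xs with
  | nil => intro hex; simp at hex
  | cons x xs ih =>
    intro hex
    by_cases hx : q x = true
    · exact ⟨[], x, xs, rfl, hx, by simp, by simp [hx]⟩
    · have hx2 : q x = false := by simpa using hx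
      obtain ⟨v, hv, hqv⟩ := hex
      rcases List.mem_cons.mp hv with rfl | hv2
      · exact absurd hqv hx
      obtain ⟨pre, w, suf, hsplit, hw, hpre, hres⟩ := ih ⟨v, hv2, hqv⟩
      refine ⟨x :: pre, w, suf, by rw [hsplit]; rfl, hw, ?_, ?_⟩
      · intro u hu
        rcases List.mem_cons.mp hu with rfl | hu2
        · exact hx2
        · exact hpre u hu2
      · rw [List.findSome?_cons]
        simp [hx2, hres]

lemma Beats_refl (b : Int × Int) : Beats b b := Or.inr ⟨rfl, le_refl _⟩

lemma Beats_trans {c b x : Int × Int} (h1 : Beats c b) (h2 : Beats b x) : Beats c x := by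
  unfold Beats at *
  omega

lemma bestFold (g : Int → Int) :
    ∀ (L : List Int) (b : Int × Int),
      ∃ c, L.foldl (fun best v =>
            match best with
            | none => some (g v, v)
            | some b' => if g v > b'.1 ∨ (g v = b'.1 ∧ v < b'.2) then some (g v, v) else some b')
          (some b)
        = some c ∧ (c = b ∨ ∃ v ∈ L, c = (g v, v)) ∧ Beats c b ∧ ∀ v ∈ L, Beats c (g v, v) := by
  intro L
  induction L with
  | nil => intro b; exact ⟨b, rfl, Or.inl rfl, Beats_refl b, by simp⟩
  | cons v L ih =>
    intro b
    simp only [List.foldl_cons]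
    by_cases hc : g v > b.1 ∨ (g v = b.1 ∧ v < b.2)
    · rw [if_pos hc]
      obtain ⟨c, hf, hor, hb, hall⟩ := ih (g v, v)
      refine ⟨c, hf, ?_, ?_, ?_⟩
      · rcases hor with rfl | ⟨u, hu, rfl⟩
        · exact Or.inr ⟨v, List.mem_cons_self, rfl⟩
        · exact Or.inr ⟨u, List.mem_cons_of_mem _ hu, rfl⟩
      · exact Beats_trans hb (by unfold Beats; simp only []; omega)
      · intro u hu
        rcases List.mem_cons.mp hu with rfl | hu2
        · exact hb
        · exact hall u hu2
    · rw [if_neg hc]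
      obtain ⟨c, hf, hor, hb, hall⟩ := ih b
      refine ⟨c, hf, ?_, hb, ?_⟩
      · rcases hor with rfl | ⟨u, hu, rfl⟩
        · exact Or.inl rfl
        · exact Or.inr ⟨u, List.mem_cons_of_mem _ hu, rfl⟩
      intro u hu
      rcases List.mem_cons.mp hu with rfl | hu2
      · exact Beats_trans hb (by unfold Beats; simp only []; omega)
      · exact hall u hu2

lemma bestFoldNone (g : Int → Int) (L : List Int) (hL : L ≠ []) :
    ∃ c, L.foldl (fun best v =>
          match best with
          | none => some (g v, v)
          | some b' => if g v > b'.1 ∨ (g v = b'.1 ∧ v < b'.2) then some (g v, v) else some b')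
        none
      = some c ∧ (∃ v ∈ L, c = (g v, v)) ∧ ∀ v ∈ L, Beats c (g v, v) := by
  cases L with
  | nil => exact absurd rfl hL
  | cons v L =>
    simp only [List.foldl_cons]
    obtain ⟨c, hf, hor, hb, hall⟩ := bestFold g L (g v, v)
    refine ⟨c, hf, ?_, ?_⟩
    · rcases hor with rfl | ⟨u, hu, rfl⟩
      · exact ⟨v, List.mem_cons_self, rfl⟩
      · exact ⟨u, List.mem_cons_of_mem _ hu, rfl⟩
    · intro u hu
      rcases List.mem_cons.mp hu with rfl | hu2
      · exact hb
      · exact hall u hu2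

lemma sorted_head_isMax (l : List Int) (m : Int) (t : List Int)
    (hs : PySem.List.sorted l (fun x => x) true = m :: t) : IsMaxOf l m := by
  constructor
  · have hm : m ∈ PySem.List.sorted l (fun x => x) true := by
      rw [hs]; exact List.mem_cons_self
    exact (PySem.List.mem_sorted l _ true m).mp hm
  · exact PySem.List.key_head_sorted_rev_ge l (fun x => x) hs

lemma bodyA (a : List Int) (acc : List Int) (i : Int) (hi : i ∈ a) :
    (let index : Int := (PySem.List.pyRange 0 a.length 1).foldl
        (fun index b => if i == PySem.List.pyGetD a b 0 then b else index) 0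
     let liste : List Int := (PySem.List.pyRange index a.length 1).foldl
        (fun l b => l ++ [PySem.List.pyGetD a b 0]) []
     match PySem.List.pyGet? (PySem.List.sorted liste (fun x => x) true) 0 with
     | some m => acc ++ [m - i]
     | none => acc)
    = acc ++ [Pv a i] := by
  obtain ⟨hsome, hlt, hget, _⟩ := Jn_spec a i hi
  have hidx : (PySem.List.pyRange 0 (a.length : Int) 1).foldl
      (fun index b => if i == PySem.List.pyGetD a b 0 then b else index) 0
      = (Jn a i : Int) := by
    rw [foldIdx a i a.length 0, hsome]
    rfl
  simp only [hidx]
  have hliste : (PySem.List.pyRange ((Jn a i : Int)) (a.length : Int) 1).foldl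
      (fun l b => l ++ [PySem.List.pyGetD a b 0]) [] = a.drop (Jn a i) := by
    rw [PySem.List.foldl_append_singleton_eq_map, List.nil_append,
        PySem.List.map_pyGetD_pyRange' a 0 (Int.natCast_nonneg _)]
    simp
  simp only [hliste]
  have hne : a.drop (Jn a i) ≠ [] := by
    intro hcon
    have := congrArg List.length hcon
    simp at this
    omega
  rcases hsorted : PySem.List.sorted (a.drop (Jn a i)) (fun x => x) true with _ | ⟨m, t⟩
  · exact absurd ((PySem.List.sorted_eq_nil_iff _ _ _).mp hsorted) hne
  · rw [PySem.List.pyGet?_zero_cons]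
    have hm : m = Mv a i :=
      IsMax_unique (sorted_head_isMax _ _ _ hsorted) (Mv_isMax a i hi)
    rw [hm]
    rfl

lemma profits_eq (a : List Int) :
    (PySem.List.sorted a (fun x => x) false).foldl (fun profits i =>
      let index : Int := (PySem.List.pyRange 0 a.length 1).foldl
        (fun index b => if i == PySem.List.pyGetD a b 0 then b else index) 0
      let liste : List Int := (PySem.List.pyRange index a.length 1).foldl
        (fun l b => l ++ [PySem.List.pyGetD a b 0]) []
      match PySem.List.pyGet? (PySem.List.sorted liste (fun x => x) true) 0 with
      | some m => profits ++ [m - i]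
      | none => profits) []
    = (PySem.List.sorted a (fun x => x) false).map (Pv a) := by
  rw [PySem.List.foldl_congr_mem _ _ (fun acc i => acc ++ [Pv a i]) []
    (fun acc i hi => bodyA a acc i ((PySem.List.mem_sorted a _ false i).mp hi))]
  rw [PySem.List.foldl_append_singleton_eq_map]
  simp

lemma BestPrice1_eq (a : List Int) : BestPrice1 a =
    (PySem.List.sorted ((PySem.List.sorted a (fun x => x) false).map (Pv a)) (fun x => x) true).findSome?
      (fun i => (PySem.List.pyRange 0 ((((PySem.List.sorted a (fun x => x) false).map (Pv a)).length : Int)) 1).findSome?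
        (fun b => if i == PySem.List.pyGetD ((PySem.List.sorted a (fun x => x) false).map (Pv a)) b 0
                  then PySem.List.pyGet? (PySem.List.sorted a (fun x => x) false) b else none)) := by
  unfold BestPrice1
  simp only [profits_eq a]

lemma aEq (a : List Int) (h : a ≠ []) :
    ∃ w p0, BestPrice1 a = some w ∧ w ∈ a ∧ Pv a w = p0 ∧
      (∀ v ∈ a, Pv a v ≤ p0) ∧ (∀ v ∈ a, Pv a v = p0 → w ≤ v) := by
  have hlow_ne : PySem.List.sorted a (fun x => x) false ≠ [] := by
    rw [Ne, PySem.List.sorted_eq_nil_iff]; exact h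
  have hprof_ne : (PySem.List.sorted a (fun x => x) false).map (Pv a) ≠ [] := by
    simpa using hlow_ne
  rcases hs : PySem.List.sorted ((PySem.List.sorted a (fun x => x) false).map (Pv a)) (fun x => x) true
    with _ | ⟨p0, t⟩
  · exact absurd ((PySem.List.sorted_eq_nil_iff _ _ _).mp hs) hprof_ne
  have hmax : IsMaxOf ((PySem.List.sorted a (fun x => x) false).map (Pv a)) p0 :=
    sorted_head_isMax _ _ _ hs
  -- rewrite the inner findSome? over the index range into one over the sorted list
  have hlen : ((PySem.List.sorted a (fun x => x) false).map (Pv a)).length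
      = (PySem.List.sorted a (fun x => x) false).length := List.length_map _
  have hinner : (PySem.List.pyRange 0 ((((PySem.List.sorted a (fun x => x) false).map (Pv a)).length : Int)) 1).findSome?
        (fun b => if p0 == PySem.List.pyGetD ((PySem.List.sorted a (fun x => x) false).map (Pv a)) b 0
                  then PySem.List.pyGet? (PySem.List.sorted a (fun x => x) false) b else none)
      = (PySem.List.sorted a (fun x => x) false).findSome?
          (fun v => if p0 == Pv a v then some v else none) := by
    rw [PySem.List.pyRange_zero_nat, findSome?_map', hlen]
    refine findSome?_range_index _ _ _ ?_
    intro k hk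
    have hk2 : k < ((PySem.List.sorted a (fun x => x) false).map (Pv a)).length := by
      rw [hlen]; exact hk
    rw [PySem.List.pyGetD_natCast, PySem.List.pyGet?_natCast,
        List.getD_eq_getElem _ 0 hk2, List.getElem_map, List.getElem?_eq_getElem hk]
  -- the maximal profit occurs somewhere
  have hex : ∃ v ∈ PySem.List.sorted a (fun x => x) false, (p0 == Pv a v) = true := by
    obtain ⟨u, hu, hup⟩ := List.mem_map.mp hmax.1
    exact ⟨u, hu, by rw [hup]; exact beq_self_eq_true p0⟩
  obtain ⟨pre, w, suf, hsplit, hw, hpre, hres⟩ :=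
    findSome?_first (fun v => p0 == Pv a v) _ hex
  have hwmem : w ∈ PySem.List.sorted a (fun x => x) false := by
    rw [hsplit]; exact List.mem_append_right _ List.mem_cons_self
  refine ⟨w, p0, ?_, (PySem.List.mem_sorted a _ false w).mp hwmem,
    (beq_iff_eq.mp hw).symm, ?_, ?_⟩
  · rw [BestPrice1_eq a, hs, List.findSome?_cons, hinner, hres]
  · intro v hv
    exact hmax.2 (Pv a v)
      (List.mem_map.mpr ⟨v, (PySem.List.mem_sorted a _ false v).mpr hv, rfl⟩)
  · intro v hv hvP
    have hvlow : v ∈ PySem.List.sorted a (fun x => x) false :=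
      (PySem.List.mem_sorted a _ false v).mpr hv
    rw [hsplit] at hvlow
    rcases List.mem_append.mp hvlow with hvpre | hvtail
    · have := hpre v hvpre
      rw [hvP] at this
      simp at this
    · rcases List.mem_cons.mp hvtail with rfl | hvsuf
      · exact le_refl _
      · have hpw := PySem.List.sorted_pairwise a (fun x => x)
        rw [hsplit] at hpw
        have h2 := (List.pairwise_append.mp hpw).2.1
        exact (List.pairwise_cons.mp h2).1 v hvsuf

lemma altEq (a : List Int) (h : a ≠ []) :
    ∃ c : Int × Int, BestPrice1_alt a = some c.2 ∧ c.2 ∈ a ∧ c.1 = Pv a c.2 ∧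
      ∀ v ∈ a, Beats c (Pv a v, v) := by
  cases a with
  | nil => exact absurd rfl h
  | cons x xs =>
    have hne : ((x :: xs) : List Int) ≠ [] := List.cons_ne_nil x xs
    -- the last-occurrence dictionary
    have hkeys : ((PySem.List.pyRange 0 (((x :: xs) : List Int).length : Int) 1).foldl
        (fun d j => d.insert (PySem.List.pyGetD ((x :: xs) : List Int) j 0) j)
        (PySem.Dict.empty : PySem.Dict Int Int)).keys = PySem.Set.ofList (x :: xs) := by
      rw [PySem.Dict.keys_foldl_insert_key _ (fun j => PySem.List.pyGetD ((x :: xs) : List Int) j 0)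
            (fun _ j => j), PySem.Dict.keys_empty, PySem.Set.update_nil_left,
          PySem.List.map_pyGetD_pyRange_zero']
    have hnodup : ((PySem.List.pyRange 0 (((x :: xs) : List Int).length : Int) 1).foldl
        (fun d j => d.insert (PySem.List.pyGetD ((x :: xs) : List Int) j 0) j)
        (PySem.Dict.empty : PySem.Dict Int Int)).keys.Nodup :=
      PySem.Dict.nodup_keys_foldl_insert_key _ _ _ _ (by simp [PySem.Dict.keys_empty])
    have hitems : ((PySem.List.pyRange 0 (((x :: xs) : List Int).length : Int) 1).foldl
        (fun d j => d.insert (PySem.List.pyGetD ((x :: xs) : List Int) j 0) j)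
        (PySem.Dict.empty : PySem.Dict Int Int)).items
        = (PySem.Set.ofList (x :: xs)).map (fun k => (k, (Jn (x :: xs) k : Int))) := by
      rw [PySem.Dict.items_eq_map_keys _ hnodup 0, hkeys]
      refine List.map_congr_left ?_
      intro k hk
      have hka : k ∈ ((x :: xs) : List Int) := (PySem.Set.mem_ofList _ _).mp hk
      rw [dictGetD (x :: xs) k ((x :: xs) : List Int).length 0, (Jn_spec (x :: xs) k hka).1]
      rfl
    -- the suffix-maximum array
    have hsufval : ∀ k ∈ ((x :: xs) : List Int),
        PySem.List.pyGetD ((scanMax (((x :: xs) : List Int).getLast hne) ((x :: xs) : List Int).reverse).reverse)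
          ((Jn (x :: xs) k : Int)) 0 - k = Pv (x :: xs) k := by
      intro k hk
      have hJ := (Jn_spec (x :: xs) k hk).2.1
      rw [PySem.List.pyGetD_natCast]
      have := IsMax_unique (suf_isMax (x :: xs) hne (Jn (x :: xs) k) hJ) (Mv_isMax (x :: xs) k hk)
      rw [List.getD_eq_getElem?_getD] at this ⊢
      rw [this]
      rfl
    simp only [BestPrice1_alt]
    rw [PySem.List.pyGetD_neg_one _ _ hne, sufFold, hitems, List.foldl_map]
    simp only [List.nil_append]
    rw [PySem.List.foldl_congr_mem _ _ (fun best v =>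
          match best with
          | none => some (Pv (x :: xs) v, v)
          | some b2 => if Pv (x :: xs) v > b2.1 ∨ (Pv (x :: xs) v = b2.1 ∧ v < b2.2)
                       then some (Pv (x :: xs) v, v) else some b2) none ?_]
    · obtain ⟨c, hf, ⟨v0, hv0, hc⟩, hall⟩ :=
        bestFoldNone (Pv (x :: xs)) (PySem.Set.ofList (x :: xs))
          (List.ne_nil_of_mem ((PySem.Set.mem_ofList (x :: xs) x).mpr List.mem_cons_self))
      rw [hf]
      refine ⟨c, rfl, ?_, ?_, ?_⟩
      · rw [hc]; exact (PySem.Set.mem_ofList _ _).mp hv0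
      · rw [hc]
      · intro v hv
        exact hall v ((PySem.Set.mem_ofList _ _).mpr hv)
    · intro best k hk
      have hka : k ∈ ((x :: xs) : List Int) := (PySem.Set.mem_ofList _ _).mp hk
      have hp := hsufval k hka
      cases best with
      | none => simp only [hp]
      | some b2 => simp only [hp]

-- ===== VERDICT (by name: the statement is the Claim_ definition above) =====
theorem BestPrice1_spec : Claim_equal_BestPrice1 := by
  unfold Claim_equal_BestPrice1
  intro a _
  unfold Spec_BestPrice1
  rcases eq_or_ne a [] with rfl | h
  · rfl
  obtain ⟨w, p0, hA, hwa, hwP, hub, hmin⟩ := aEq a h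
  obtain ⟨c, hB, hca, hcP, hall⟩ := altEq a h
  have h1 : c.1 ≤ p0 := by rw [hcP]; exact hub c.2 hca
  have h2 := hall w hwa
  rw [hwP] at h2
  unfold Beats at h2
  have hc1 : c.1 = p0 := by omega
  have hle1 : c.2 ≤ w := by omega
  have hle2 : w ≤ c.2 := hmin c.2 hca (by rw [← hcP, hc1])
  have hwc : w = c.2 := le_antisymm hle2 hle1
  rw [hA, hB, hwc]
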